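-- pv_equiv track=rewrite | github.com/Bol-C14/EEsizer | src/eesizer_core/domain/spice/sanitize_rules.py | normalize_spice_lines
-- ===== SOURCE A (Python) =====
-- from typing import List, Tuple
--
-- def normalize_spice_lines(lines: List[str]) -> List[str]:
--     """Merge continuation lines starting with '+' into previous line."""
--     normalized: List[str] = []
--     for line in lines:
--         stripped = line.lstrip()
--         if stripped.startswith("+"):
--             continuation = stripped.lstrip("+").strip()
--             if normalized:
--                 prev = normalized.pop()
--                 normalized.append(f"{prev.rstrip()} {continuation}".strip())
--             elif continuation:
--                 normalized.append(continuation)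
--             continue
--         normalized.append(line)
--     return normalized
-- ===== SOURCE B (Python) =====
-- from typing import List, Optional, Tuple
--
-- def normalize_spice_lines(lines: List[str]) -> List[str]:
--     """Merge continuation lines starting with '+' into previous line.
--
--     Two passes: first group lines into runs (base line + list of continuations),
--     then render each run by joining its non-empty parts with single spaces.
--     """
--     # Pass 1: group into runs. base is None for a run started by leading '+' lines.
--     runs: List[Tuple[Optional[str], List[str]]] = []
--     for line in lines:
--         s = line.lstrip()
--         if s.startswith("+"):
--             cont = s.lstrip("+").strip()
--             if runs:
--                 runs[-1][1].append(cont)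
--             elif cont:
--                 runs.append((None, [cont]))
--         else:
--             runs.append((line, []))
--     # Pass 2: render each run.
--     out: List[str] = []
--     for base, conts in runs:
--         if base is not None and not conts:
--             out.append(base)  # lone line stays raw
--         else:
--             parts = [base.strip()] if base is not None else []
--             parts.extend(conts)
--             out.append(" ".join(p for p in parts if p))
--     return out
-- ===== Notes on version B (the rewrite author's own statement) =====
-- stated objective: alternative
-- what changed: Replaces A's single pop/re-append concatenation loop by a two-pass design: first group the lines into runs (base line plus its list of stripped continuations), then render each run by joining its non-empty parts with single spaces (a lone line staying raw).
import Mathlib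
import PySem

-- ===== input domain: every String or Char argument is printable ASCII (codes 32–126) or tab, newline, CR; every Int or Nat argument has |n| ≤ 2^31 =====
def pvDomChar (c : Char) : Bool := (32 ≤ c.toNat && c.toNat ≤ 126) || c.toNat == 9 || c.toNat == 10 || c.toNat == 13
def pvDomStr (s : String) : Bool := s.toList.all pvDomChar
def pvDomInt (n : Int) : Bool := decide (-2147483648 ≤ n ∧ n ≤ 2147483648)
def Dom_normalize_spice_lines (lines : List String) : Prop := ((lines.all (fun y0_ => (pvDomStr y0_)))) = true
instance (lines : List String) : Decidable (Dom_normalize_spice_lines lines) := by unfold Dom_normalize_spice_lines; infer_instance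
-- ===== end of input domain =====

-- B replaces A's pop/re-append concatenation loop by two passes — group the lines into runs
-- (base line + its continuations), then join each run — same values, different decomposition.

-- ===== PORT A =====
-- exact port of str.lstrip("+") for the one-character strip set "+"
def pvLstripPlus (cs : List Char) : List Char := cs.dropWhile (· == '+')

-- one iteration of A's loop; A's `normalized` is kept in reverse (head = Python's last element,
-- so list.pop() is a head match and append is cons); it is reversed back at the end
def pvStepA (normalized : List (List Char)) (line : List Char) : List (List Char) :=
  let stripped := PySem.Chars.lstrip line
  if PySem.Chars.startswith stripped ['+'] then
    let continuation := PySem.Chars.strip (pvLstripPlus stripped)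
    match normalized with
    | prev :: rest => PySem.Chars.strip (PySem.Chars.rstrip prev ++ ' ' :: continuation) :: rest
    | [] => if continuation.isEmpty then [] else [continuation]
  else line :: normalized

def normalize_spice_lines (lines : List String) : List String :=
  (((lines.map String.toList).foldl pvStepA []).reverse).map String.ofList

-- ===== PORT B =====
-- a run = (base line, or none for a leading-'+' run, and its continuations); runs and each
-- run's continuation list are built head-first (reversed) and reversed when rendered
def pvStepB (runs : List (Option (List Char) × List (List Char))) (line : List Char) :
    List (Option (List Char) × List (List Char)) :=
  let s := PySem.Chars.lstrip line
  if PySem.Chars.startswith s ['+'] then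
    let cont := PySem.Chars.strip (pvLstripPlus s)
    match runs with
    | (b, cs) :: rest => (b, cont :: cs) :: rest
    | [] => if cont.isEmpty then [] else [(none, [cont])]
  else (some line, []) :: runs

-- pass 2: render one run — a lone line stays raw, else join the non-empty parts with spaces
def pvRender (r : Option (List Char) × List (List Char)) : List Char :=
  match r with
  | (some b, []) => b
  | (b?, cs) =>
    let parts := (match b? with | some b => [PySem.Chars.strip b] | none => []) ++ cs.reverse
    PySem.Chars.join [' '] (parts.filter (fun p => !p.isEmpty))

def normalize_spice_lines_alt (lines : List String) : List String :=
  ((((lines.map String.toList).foldl pvStepB []).reverse).map pvRender).map String.ofList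

-- ===== PRECONDITION & SPEC =====
def Spec_normalize_spice_lines (lines : List String) (out : List String) : Prop := out = normalize_spice_lines_alt lines
instance (lines : List String) (out : List String) : Decidable (Spec_normalize_spice_lines lines out) := by unfold Spec_normalize_spice_lines; infer_instance

-- ===== CLAIM (what is proved, stated in full; the proofs are below) =====
def Claim_equal_normalize_spice_lines : Prop := ∀ (lines : List String), Dom_normalize_spice_lines lines → Spec_normalize_spice_lines lines (normalize_spice_lines lines)

-- ===== LEMMAS AND PROOFS =====

-- a string with no leading and no trailing whitespace (the shape strip produces)
def pvCln (u : List Char) : Prop := PySem.Chars.lstrip u = u ∧ PySem.Chars.rstrip u = u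

-- a run as built by pvStepB: continuations are stripped, and a base-less run is nonempty
def pvGood (r : Option (List Char) × List (List Char)) : Prop :=
  (∀ c ∈ r.2, pvCln c) ∧ (r.1 = none → r.2 ≠ [])

def pvJoinNE (ps : List (List Char)) : List Char :=
  PySem.Chars.join [' '] (ps.filter (fun p => !p.isEmpty))

lemma dw_cons_head {α : Type} {p : α → Bool} {l : List α} {a : α} {t : List α}
    (h : l.dropWhile p = a :: t) : p a = false := by
  induction l with
  | nil => simp at h
  | cons x xs ih =>
    rw [List.dropWhile_cons] at h
    by_cases hx : p x = true
    · rw [if_pos hx] at h; exact ih h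
    · rw [if_neg hx] at h
      cases h
      simpa using hx

lemma dw_idem {α : Type} (p : α → Bool) (l : List α) :
    (l.dropWhile p).dropWhile p = l.dropWhile p := by
  cases h : l.dropWhile p with
  | nil => simp
  | cons a t => rw [List.dropWhile_cons, if_neg (by simp [dw_cons_head h])]

lemma pvCln_nil : pvCln [] := by constructor <;> rfl

lemma pvCln_head {a : Char} {t : List Char} (h : pvCln (a :: t)) : PySem.Chars.isspace a = false :=
  dw_cons_head (l := a :: t) h.1

lemma rstrip_to_dw {u : List Char} (h : PySem.Chars.rstrip u = u) :
    List.dropWhile PySem.Chars.isspace u.reverse = u.reverse := by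
  have := congrArg List.reverse h
  simpa [PySem.Chars.rstrip] using this

lemma pvCln_last {u : List Char} (h : pvCln u) {a : Char} {t : List Char}
    (hr : u.reverse = a :: t) : PySem.Chars.isspace a = false := by
  have h3 := rstrip_to_dw h.2
  rw [hr] at h3
  exact dw_cons_head h3

lemma lstrip_noop {u : List Char} (h : pvCln u) (hne : u ≠ []) (t : List Char) :
    PySem.Chars.lstrip (u ++ t) = u ++ t := by
  obtain ⟨a, t', rfl⟩ := List.exists_cons_of_ne_nil hne
  have ha := pvCln_head h
  simp [PySem.Chars.lstrip, ha]

lemma rstrip_noop {c : List Char} (h : pvCln c) (hne : c ≠ []) (t : List Char) :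
    PySem.Chars.rstrip (t ++ c) = t ++ c := by
  have hrne : c.reverse ≠ [] := by simpa using hne
  obtain ⟨a, cr, hrev⟩ := List.exists_cons_of_ne_nil hrne
  have ha := pvCln_last h hrev
  rw [PySem.Chars.rstrip]
  have h2 : (t ++ c).reverse = a :: (cr ++ t.reverse) := by
    rw [List.reverse_append, hrev, List.cons_append]
  rw [h2, List.dropWhile_cons, if_neg (by simp [ha])]
  have h3 : a :: (cr ++ t.reverse) = (t ++ c).reverse := h2.symm
  rw [h3, List.reverse_reverse]

-- if a string has no leading whitespace, neither has its rstrip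
lemma lstrip_rstrip_self {y : List Char} (h : PySem.Chars.lstrip y = y) :
    PySem.Chars.lstrip (PySem.Chars.rstrip y) = PySem.Chars.rstrip y := by
  cases hz : PySem.Chars.rstrip y with
  | nil => rfl
  | cons a t =>
    have h1 : List.dropWhile PySem.Chars.isspace y.reverse = (a :: t).reverse := by
      have := congrArg List.reverse hz
      simpa [PySem.Chars.rstrip] using this
    have hsuf : (a :: t).reverse <:+ y.reverse := h1 ▸ List.dropWhile_suffix _
    have hpre : (a :: t) <+: y := by
      rw [← List.reverse_suffix]; exact hsuf
    obtain ⟨s, hs⟩ := hpre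
    have hy2 : List.dropWhile PySem.Chars.isspace y = a :: (t ++ s) := by
      rw [show List.dropWhile PySem.Chars.isspace y = PySem.Chars.lstrip y from rfl, h, ← hs]
      simp
    have ha : PySem.Chars.isspace a = false := dw_cons_head hy2
    simp [PySem.Chars.lstrip, ha]

lemma lstrip_strip (x : List Char) :
    PySem.Chars.lstrip (PySem.Chars.strip x) = PySem.Chars.strip x := by
  rw [PySem.Chars.strip]
  exact lstrip_rstrip_self (dw_idem _ _)

lemma rstrip_idem (y : List Char) :
    PySem.Chars.rstrip (PySem.Chars.rstrip y) = PySem.Chars.rstrip y := by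
  simp [PySem.Chars.rstrip, List.reverse_reverse, dw_idem]

lemma rstrip_strip (x : List Char) :
    PySem.Chars.rstrip (PySem.Chars.strip x) = PySem.Chars.strip x := by
  rw [PySem.Chars.strip]
  exact rstrip_idem _

lemma pvCln_strip (x : List Char) : pvCln (PySem.Chars.strip x) :=
  ⟨lstrip_strip x, rstrip_strip x⟩

-- the two ends commute: lstrip ∘ rstrip = rstrip ∘ lstrip = strip
lemma lstrip_rstrip (x : List Char) :
    PySem.Chars.lstrip (PySem.Chars.rstrip x) = PySem.Chars.strip x := by
  rw [PySem.Chars.strip]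
  have hx : List.takeWhile PySem.Chars.isspace x ++ List.dropWhile PySem.Chars.isspace x = x :=
    List.takeWhile_append_dropWhile
  have hsp : ∀ c ∈ List.takeWhile PySem.Chars.isspace x, PySem.Chars.isspace c = true :=
    fun c hc => List.mem_takeWhile_imp hc
  by_cases hy : List.dropWhile PySem.Chars.isspace x = []
  · have hxsp : ∀ c ∈ x, PySem.Chars.isspace c = true := by
      intro c hc
      rw [← hx] at hc
      rcases List.mem_append.1 hc with h | h
      · exact hsp c h
      · rw [hy] at h; simp at h
    have hdw : List.dropWhile PySem.Chars.isspace x.reverse = [] :=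
      List.dropWhile_eq_nil_iff.2 (fun c hc => hxsp c (by simpa using hc))
    show PySem.Chars.lstrip (PySem.Chars.rstrip x) = PySem.Chars.rstrip (PySem.Chars.lstrip x)
    rw [show PySem.Chars.lstrip x = List.dropWhile PySem.Chars.isspace x from rfl, hy]
    rw [PySem.Chars.rstrip, hdw]
    rfl
  · -- y := dropWhile ws x is nonempty; lstrip y = y
    have hyl : PySem.Chars.lstrip (List.dropWhile PySem.Chars.isspace x)
        = List.dropWhile PySem.Chars.isspace x := dw_idem _ _
    have hry : PySem.Chars.lstrip (PySem.Chars.rstrip (List.dropWhile PySem.Chars.isspace x))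
        = PySem.Chars.rstrip (List.dropWhile PySem.Chars.isspace x) := lstrip_rstrip_self hyl
    have hzne : List.dropWhile PySem.Chars.isspace (List.dropWhile PySem.Chars.isspace x).reverse ≠ [] := by
      intro hz
      obtain ⟨a, t, hyat⟩ := List.exists_cons_of_ne_nil hy
      have ha : PySem.Chars.isspace a = false := dw_cons_head hyat
      have := List.dropWhile_eq_nil_iff.1 hz a (by rw [hyat]; simp)
      rw [this] at ha; cases ha
    have h1 : PySem.Chars.rstrip x = List.takeWhile PySem.Chars.isspace x
        ++ PySem.Chars.rstrip (List.dropWhile PySem.Chars.isspace x) := by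
      rw [PySem.Chars.rstrip, PySem.Chars.rstrip]
      rw [show x.reverse = (List.dropWhile PySem.Chars.isspace x).reverse
            ++ (List.takeWhile PySem.Chars.isspace x).reverse by rw [← List.reverse_append, hx]]
      rw [List.dropWhile_append, if_neg (by simpa [List.isEmpty_iff] using hzne)]
      rw [List.reverse_append, List.reverse_reverse]
    rw [h1, PySem.Chars.lstrip, List.dropWhile_append]
    rw [if_pos (by simp [List.isEmpty_iff, List.dropWhile_eq_nil_iff]; exact fun c hc => hsp c hc)]
    exact hry

-- THE merge lemma: A's f"{u.rstrip()} {c}".strip() on clean u, c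
lemma merge_clean {u c : List Char} (hu : pvCln u) (hc : pvCln c) :
    PySem.Chars.strip (PySem.Chars.rstrip u ++ ' ' :: c) =
      if c = [] then u else if u = [] then c else u ++ ' ' :: c := by
  rw [hu.2]
  by_cases hc0 : c = []
  · subst hc0
    rw [if_pos rfl]
    by_cases hu0 : u = []
    · subst hu0; decide
    · rw [PySem.Chars.strip, lstrip_noop hu hu0]
      rw [PySem.Chars.rstrip]
      have h2 : (u ++ [' ']).reverse = ' ' :: u.reverse := by simp
      rw [h2, List.dropWhile_cons, if_pos (by decide), rstrip_to_dw hu.2, List.reverse_reverse]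
  · rw [if_neg hc0]
    by_cases hu0 : u = []
    · subst hu0
      rw [if_pos rfl, List.nil_append]
      rw [PySem.Chars.strip, PySem.Chars.lstrip, List.dropWhile_cons, if_pos (by decide)]
      rw [show List.dropWhile PySem.Chars.isspace c = c from hc.1, hc.2]
    · rw [if_neg hu0]
      rw [PySem.Chars.strip, lstrip_noop hu hu0]
      have h3 := rstrip_noop hc hc0 (u ++ [' '])
      simpa using h3

-- dropping interior whitespace of the base first does not change A's merged value
lemma strip_append_lstrip (r z : List Char) :
    PySem.Chars.strip (r ++ z) = PySem.Chars.strip (PySem.Chars.lstrip r ++ z) := by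
  rw [PySem.Chars.strip, PySem.Chars.strip]
  congr 1
  rw [PySem.Chars.lstrip, PySem.Chars.lstrip, PySem.Chars.lstrip,
    List.dropWhile_append, List.dropWhile_append, dw_idem]

-- A's first merge with a raw base b reduces to the clean case on strip b
lemma merge_raw (b z : List Char) :
    PySem.Chars.strip (PySem.Chars.rstrip b ++ z) =
      PySem.Chars.strip (PySem.Chars.rstrip (PySem.Chars.strip b) ++ z) := by
  have h1 : PySem.Chars.strip (PySem.Chars.strip b ++ z)
      = PySem.Chars.strip (PySem.Chars.lstrip (PySem.Chars.rstrip b) ++ z) := by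
    rw [lstrip_rstrip]
  rw [rstrip_strip, h1]
  exact strip_append_lstrip _ _

-- join of nonempty clean pieces is clean and nonempty
lemma join_ne_nil {l : List (List Char)} (h : ∀ p ∈ l, pvCln p ∧ p ≠ []) (hl : l ≠ []) :
    PySem.Chars.join [' '] l ≠ [] := by
  cases l with
  | nil => exact absurd rfl hl
  | cons a t =>
    cases t with
    | nil => rw [PySem.Chars.join_singleton]; exact (h a (by simp)).2
    | cons b t' =>
      rw [PySem.Chars.join_cons_cons]
      simp [List.append_eq_nil_iff, (h a (by simp)).2]

lemma cln_join {l : List (List Char)} (h : ∀ p ∈ l, pvCln p ∧ p ≠ []) :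
    pvCln (PySem.Chars.join [' '] l) := by
  induction l with
  | nil => simpa [PySem.Chars.join_nil] using pvCln_nil
  | cons a t ih =>
    cases t with
    | nil => rw [PySem.Chars.join_singleton]; exact (h a (by simp)).1
    | cons b t' =>
      rw [PySem.Chars.join_cons_cons]
      have ha := h a (by simp)
      have hrest : ∀ p ∈ b :: t', pvCln p ∧ p ≠ [] := fun p hp => h p (by simp [hp])
      have hJ : pvCln (PySem.Chars.join [' '] (b :: t')) := ih hrest
      have hJne : PySem.Chars.join [' '] (b :: t') ≠ [] := join_ne_nil hrest (by simp)
      constructor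
      · have := lstrip_noop ha.1 ha.2 ([' '] ++ PySem.Chars.join [' '] (b :: t'))
        simpa [List.append_assoc] using this
      · have := rstrip_noop hJ hJne (a ++ [' '])
        simpa [List.append_assoc] using this

lemma join_append_singleton {l : List (List Char)} {c : List Char} :
    PySem.Chars.join [' '] (l ++ [c]) =
      if l = [] then c else PySem.Chars.join [' '] l ++ ' ' :: c := by
  induction l with
  | nil => simp [PySem.Chars.join_singleton]
  | cons a t ih =>
    cases t with
    | nil =>
      rw [show (([a] : List (List Char)) ++ [c]) = [a, c] from rfl,
        PySem.Chars.join_cons_cons, PySem.Chars.join_singleton, PySem.Chars.join_singleton]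
      simp
    | cons b t' =>
      rw [show ((a :: b :: t') ++ [c]) = a :: ((b :: t') ++ [c]) from rfl]
      rw [show (a :: ((b :: t') ++ [c])) = a :: b :: (t' ++ [c]) from rfl,
        PySem.Chars.join_cons_cons,
        show (b :: (t' ++ [c])) = ((b :: t') ++ [c]) from rfl, ih]
      rw [if_neg (by simp), if_neg (by simp), PySem.Chars.join_cons_cons]
      simp [List.append_assoc]

lemma joinNE_single (b : List Char) : pvJoinNE [b] = b := by
  by_cases h : b = []
  · simp [pvJoinNE, h, PySem.Chars.join_nil]
  · have hb : b.isEmpty = false := by simp [h]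
    simp [pvJoinNE, hb, PySem.Chars.join_singleton]

-- appending one continuation to a joined run of clean parts = A's merge step
lemma joinNE_snoc {ps : List (List Char)} (hps : ∀ p ∈ ps, pvCln p) {c : List Char} (hc : pvCln c) :
    PySem.Chars.strip (PySem.Chars.rstrip (pvJoinNE ps) ++ ' ' :: c) = pvJoinNE (ps ++ [c]) := by
  have hF : ∀ p ∈ ps.filter (fun p => !p.isEmpty), pvCln p ∧ p ≠ [] := by
    intro p hp
    refine ⟨hps p (List.mem_of_mem_filter hp), ?_⟩
    have := List.of_mem_filter hp
    simpa [List.isEmpty_iff] using this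
  have hu : pvCln (pvJoinNE ps) := cln_join hF
  rw [merge_clean hu hc]
  unfold pvJoinNE
  rw [List.filter_append]
  by_cases hc0 : c = []
  · subst hc0
    simp
  · rw [if_neg hc0]
    have hce : c.isEmpty = false := by simp [hc0]
    rw [show List.filter (fun p => !p.isEmpty) [c] = [c] by simp [hce]]
    rw [join_append_singleton]
    by_cases hF0 : List.filter (fun p => !p.isEmpty) ps = []
    · rw [if_pos hF0, if_pos (by simp [hF0, PySem.Chars.join_nil])]
    · rw [if_neg hF0, if_neg (by simpa [pvJoinNE] using join_ne_nil hF hF0)]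

lemma pvRender_some_nil (b : List Char) : pvRender (some b, []) = b := rfl

lemma pvRender_cons (b? : Option (List Char)) (c : List Char) (cs : List (List Char)) :
    pvRender (b?, c :: cs) =
      pvJoinNE ((match b? with | some b => [PySem.Chars.strip b] | none => []) ++ (c :: cs).reverse) := by
  cases b? <;> rfl

lemma pvRender_none (cs : List (List Char)) :
    pvRender (none, cs) = pvJoinNE (cs.reverse) := by
  cases cs <;> rfl

-- appending one continuation to a rendered run = A's merge step
lemma render_snoc {b? : Option (List Char)} {cs : List (List Char)} (hg : pvGood (b?, cs))
    {c : List Char} (hc : pvCln c) :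
    PySem.Chars.strip (PySem.Chars.rstrip (pvRender (b?, cs)) ++ ' ' :: c) =
      pvRender (b?, c :: cs) := by
  cases b? with
  | none =>
    rw [pvRender_none, pvRender_cons]
    have hmem : ∀ p ∈ cs.reverse, pvCln p := fun p hp => hg.1 p (by simpa using hp)
    have := joinNE_snoc hmem hc
    simpa using this
  | some b =>
    cases cs with
    | nil =>
      rw [pvRender_some_nil, pvRender_cons, merge_raw]
      have h1 := joinNE_single (PySem.Chars.strip b)
      rw [← h1]
      have := joinNE_snoc (ps := [PySem.Chars.strip b])
        (by intro p hp; simp at hp; subst hp; exact pvCln_strip b) hc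
      simpa using this
    | cons c' cs' =>
      rw [pvRender_cons, pvRender_cons]
      have hmem : ∀ p ∈ [PySem.Chars.strip b] ++ (c' :: cs').reverse, pvCln p := by
        intro p hp
        rcases List.mem_append.1 hp with h | h
        · simp at h; subst h; exact pvCln_strip b
        · rw [List.mem_reverse] at h; exact hg.1 p h
      have := joinNE_snoc hmem hc
      simpa [List.append_assoc] using this

-- one loop step: A's step on the rendered runs = render of B's step; goodness is preserved
lemma step_comm {runs : List (Option (List Char) × List (List Char))}
    (hg : ∀ r ∈ runs, pvGood r) (l : List Char) :
    pvStepA (runs.map pvRender) l = (pvStepB runs l).map pvRender ∧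
      ∀ r ∈ pvStepB runs l, pvGood r := by
  unfold pvStepA pvStepB
  by_cases hsw : PySem.Chars.startswith (PySem.Chars.lstrip l) ['+'] = true
  · simp only [hsw, if_true]
    cases runs with
    | nil =>
      simp only [List.map_nil]
      by_cases he : (PySem.Chars.strip (pvLstripPlus (PySem.Chars.lstrip l))).isEmpty = true
      · simp [he]
      · simp only [he, Bool.false_eq_true, if_false, List.map_cons, List.map_nil]
        constructor
        · rw [pvRender_none]
          simp [joinNE_single]
        · intro r hr
          simp at hr
          subst hr
          exact ⟨by intro c hcm; simp at hcm; subst hcm; exact pvCln_strip _, by simp⟩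
    | cons r rest =>
      obtain ⟨b?, cs⟩ := r
      simp only [List.map_cons]
      constructor
      · rw [render_snoc (hg _ (by simp)) (pvCln_strip _)]
      · intro r hr
        rcases List.mem_cons.1 hr with h | h
        · subst h
          refine ⟨?_, by simp⟩
          intro x hx
          rcases List.mem_cons.1 hx with h' | h'
          · subst h'; exact pvCln_strip _
          · exact (hg (b?, cs) (by simp)).1 x h'
        · exact hg _ (List.mem_cons_of_mem _ h)
  · simp only [hsw, Bool.false_eq_true, if_false, List.map_cons]
    exact ⟨rfl, by
      intro r hr
      rcases List.mem_cons.1 hr with h | h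
      · subst h; exact ⟨by simp, by simp⟩
      · exact hg _ h⟩

-- the loop invariant: A's accumulator is the rendering of B's runs
lemma inv_step (ls : List (List Char)) :
    ∀ (runs : List (Option (List Char) × List (List Char))),
      (∀ r ∈ runs, pvGood r) →
      ls.foldl pvStepA (runs.map pvRender) = (ls.foldl pvStepB runs).map pvRender := by
  induction ls with
  | nil => intro runs _; rfl
  | cons l ls ih =>
    intro runs hg
    simp only [List.foldl_cons]
    obtain ⟨h1, h2⟩ := step_comm hg l
    rw [h1]
    exact ih _ h2

-- ===== VERDICT (by name: the statement is the Claim_ definition above) =====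
theorem normalize_spice_lines_spec : Claim_equal_normalize_spice_lines := by
  intro lines _
  unfold Spec_normalize_spice_lines normalize_spice_lines normalize_spice_lines_alt
  have h := inv_step (lines.map String.toList) [] (by simp)
  simp only [List.map_nil] at h
  rw [h, ← List.map_reverse]
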